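-- pv_equiv track=rewrite | github.com/Gnoyh/baekjoon | baekjoon_4779.py | cantorian
-- ===== SOURCE A (Python) =====
-- def cantorian(N, str):
--     if N == 0:
--         str += "-"
--     else:
--         str = cantorian(N - 1, str)
--
--         str += " " * (3 ** (N - 1))
--
--         str = cantorian(N - 1, str)
--
--     return str
-- ===== SOURCE B (Python) =====
-- def cantorian(N, str):
--     result = "-"
--     k = 0
--     while k < N:
--         result = result + " " * (3 ** k) + result
--         k += 1
--     return str + result
-- ===== Notes on version B (the rewrite author's own statement) =====
-- stated objective: simpler
-- what changed: Replaces the binary recursion with an iterative doubling loop that builds the Cantor string once (result = result + spaces + result) and prepends the accumulator at the end.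
import Mathlib
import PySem

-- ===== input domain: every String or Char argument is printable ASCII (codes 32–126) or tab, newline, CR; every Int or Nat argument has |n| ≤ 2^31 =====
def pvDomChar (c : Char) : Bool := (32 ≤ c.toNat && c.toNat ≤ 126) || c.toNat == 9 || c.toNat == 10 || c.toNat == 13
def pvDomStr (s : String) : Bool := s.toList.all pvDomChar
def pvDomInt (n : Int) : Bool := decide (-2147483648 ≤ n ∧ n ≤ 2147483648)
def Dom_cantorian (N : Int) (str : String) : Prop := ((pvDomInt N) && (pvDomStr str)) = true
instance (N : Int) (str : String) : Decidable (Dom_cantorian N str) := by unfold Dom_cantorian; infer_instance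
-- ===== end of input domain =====

-- B replaces A's binary recursion by an iterative doubling loop (objective: simpler).

-- ===== PORT A =====
-- A's recursion, step for step, with the (non-negative) recursion depth as structural argument.
def cantorianAux : Nat → String → String
  | 0, s => s ++ "-"
  | n + 1, s =>
    let s1 := cantorianAux n s
    let s2 := s1 ++ String.ofList (List.replicate (3 ^ n) ' ')
    cantorianAux n s2

def cantorian (N : Int) (str : String) : String := cantorianAux N.toNat str

-- ===== PORT B =====
-- Source B's while loop: k counts up from 0 while k < N, doubling `result` each step.
def cantorian_alt (N : Int) (str : String) : String :=
  str ++ Nat.fold N.toNat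
    (fun k _ r => r ++ String.ofList (List.replicate (3 ^ k) ' ') ++ r) "-"

-- ===== PRECONDITION & SPEC =====
-- Pre_ excludes N < 0, on which A recurses without bound (RecursionError).
def Pre_cantorian (N : Int) (_str : String) : Prop := 0 ≤ N
instance (N : Int) (str : String) : Decidable (Pre_cantorian N str) := by unfold Pre_cantorian; infer_instance
def pvWitness_cantorian : Int × String := (2, "ab")

def Spec_cantorian (N : Int) (str : String) (out : String) : Prop := out = cantorian_alt N str
instance (N : Int) (str : String) (out : String) : Decidable (Spec_cantorian N str out) := by unfold Spec_cantorian; infer_instance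

-- ===== CLAIM (what is proved, stated in full; the proofs are below) =====
def Claim_equal_cantorian : Prop := ∀ (N : Int) (str : String), Dom_cantorian N str → Pre_cantorian N str → Spec_cantorian N str (cantorian N str)

-- ===== LEMMAS AND PROOFS =====
-- A's recursion prepends its accumulator: cantorianAux n s = s ++ (B's loop value after n steps).
theorem cantorianAux_eq (n : Nat) : ∀ (s : String),
    cantorianAux n s =
      s ++ Nat.fold n (fun k _ r => r ++ String.ofList (List.replicate (3 ^ k) ' ') ++ r) "-" := by
  induction n with
  | zero => intro s; rfl
  | succ n ih =>
    intro s
    simp only [cantorianAux, ih, Nat.fold]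
    simp [String.append_assoc]

-- ===== VERDICT (by name: the statement is the Claim_ definition above) =====
theorem cantorian_spec : Claim_equal_cantorian := by
  intro N str _ _
  unfold Spec_cantorian cantorian cantorian_alt
  exact cantorianAux_eq N.toNat str
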